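-- pv_equiv track=rewrite | github.com/peteryuhang/Computer-Systems-A-Programmer-Perspective | ch4/test.py | process
-- ===== SOURCE A (Python) =====
-- def process(data):
--   """
--   Process the data which already been separated, also sorted on order number
--   Generate the decode string
--
--   @param data: sorted data with type list of lists
--   @return decode string
--   """
--
--   idx, sep = 0, 2
--   res = []
--   while idx < len(data):
--     res.append(data[idx][1])
--     idx += sep
--     sep += 1
--
--   return ' '.join(res)
-- ===== SOURCE B (Python) =====
-- def process(data):
--   def go(rows, skip):
--     if not rows:
--       return []
--     return [rows[0][1]] + go(rows[1 + skip:], skip + 1)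
--   return ' '.join(go(data, 1))
-- ===== Notes on version B (the rewrite author's own statement) =====
-- stated objective: alternative
-- what changed: Replaces A's index/step accumulator while-loop over the whole list with structural recursion on suffix slices: take the head's second field, slice off the next skip rows, recurse with skip+1; no indices are computed at all.
import Mathlib
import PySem

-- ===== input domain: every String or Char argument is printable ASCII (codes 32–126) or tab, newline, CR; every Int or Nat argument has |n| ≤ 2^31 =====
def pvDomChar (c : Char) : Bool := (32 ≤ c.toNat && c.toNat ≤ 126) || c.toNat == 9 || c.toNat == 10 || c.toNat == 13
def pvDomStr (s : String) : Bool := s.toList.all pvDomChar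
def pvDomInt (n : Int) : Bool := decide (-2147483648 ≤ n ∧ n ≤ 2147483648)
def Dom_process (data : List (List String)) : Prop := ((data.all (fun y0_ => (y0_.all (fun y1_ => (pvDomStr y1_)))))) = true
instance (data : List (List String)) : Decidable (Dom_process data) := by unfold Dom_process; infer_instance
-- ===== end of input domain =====

-- B replaces A's index/step accumulator while-loop by structural recursion on suffix
-- slices (head, then slice off the next `skip` rows, recurse with skip+1); objective:
-- alternative decomposition, no speed claim.

-- ===== PORT A =====
-- A's while loop; `sep2` encodes A's `sep` as sep = sep2 + 2 (sep starts at 2 and only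
-- grows), which makes the increase of idx visibly positive for termination.
-- `(data.getD idx []).getD 1 ""` is Python's data[idx][1] for these nonnegative indices:
-- idx < len(data) is the loop guard, and the inner default "" fires exactly where
-- Python raises IndexError (excluded by Pre_process).
def processLoopA (data : List (List String)) (idx sep2 : Nat) (res : List String) : List String :=
  if idx < data.length then
    processLoopA data (idx + sep2 + 2) (sep2 + 1) (res ++ [(data.getD idx []).getD 1 ""])
  else res
termination_by data.length - idx
decreasing_by omega

def process (data : List (List String)) : String :=
  String.intercalate " " (processLoopA data 0 0 [])

-- ===== PORT B =====
-- B's recursion: for rows = r :: rest, Python's rows[1 + skip:] is rest.drop skip;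
-- r.getD 1 "" is rows[0][1], with "" exactly where Python raises (excluded by Pre_process).
def processGoB (rows : List (List String)) (skip : Nat) : List String :=
  match rows with
  | [] => []
  | r :: rest => r.getD 1 "" :: processGoB (rest.drop skip) (skip + 1)
termination_by rows.length
decreasing_by simp [List.length_drop]

def process_alt (data : List (List String)) : String :=
  String.intercalate " " (processGoB data 1)

-- ===== PRECONDITION & SPEC =====
-- Pre_ excludes exactly the inputs on which Python A raises IndexError: those where some
-- visited row (one whose index i satisfies i+1 triangular) has fewer than 2 elements.
def Pre_process (data : List (List String)) : Prop :=
  ∀ i ∈ List.range data.length,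
    (∃ k ∈ List.range (i + 2), k * (k + 1) / 2 = i + 1) → 2 ≤ (data.getD i []).length
instance (data : List (List String)) : Decidable (Pre_process data) := by
  unfold Pre_process; infer_instance

def pvWitness_process : List (List String) :=
  [["1", "hello"], ["2", "mid"], ["3", "world"]]

def Spec_process (data : List (List String)) (out : String) : Prop := out = process_alt data
instance (data : List (List String)) (out : String) : Decidable (Spec_process data out) := by
  unfold Spec_process; infer_instance

-- ===== CLAIM (what is proved, stated in full; the proofs are below) =====
def Claim_equal_process : Prop :=
  ∀ (data : List (List String)), Dom_process data → Pre_process data → Spec_process data (process data)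

-- ===== LEMMAS AND PROOFS =====

-- loop correspondence: A's state (idx, sep = sep2 + 2) corresponds to B working on the
-- suffix data.drop idx with skip = sep2 + 1.
lemma loop_eq (data : List (List String)) :
    ∀ m idx sep2 res, data.length - idx ≤ m →
      processLoopA data idx sep2 res = res ++ processGoB (data.drop idx) (sep2 + 1) := by
  intro m
  induction m with
  | zero =>
    intro idx sep2 res hm
    rw [processLoopA, if_neg (by omega), List.drop_eq_nil_of_le (by omega)]
    simp [processGoB]
  | succ m ih =>
    intro idx sep2 res hm
    by_cases h : idx < data.length
    · rw [processLoopA, if_pos h]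
      have hdrop : data.drop idx = data[idx] :: data.drop (idx + 1) :=
        List.drop_eq_getElem_cons h
      rw [hdrop]; simp only [processGoB]
      have hdd : (data.drop (idx + 1)).drop (sep2 + 1) = data.drop (idx + sep2 + 2) := by
        rw [List.drop_drop]; congr 1; omega
      rw [hdd, ih (idx + sep2 + 2) (sep2 + 1) _ (by omega)]
      simp [List.getD_eq_getElem?_getD, List.getElem?_eq_getElem h]
    · rw [processLoopA, if_neg h, List.drop_eq_nil_of_le (by omega)]
      simp [processGoB]

-- ===== VERDICT (by name: the statement is the Claim_ definition above) =====
theorem process_spec : Claim_equal_process := by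
  intro data _ _
  unfold Spec_process process process_alt
  rw [loop_eq data data.length 0 0 [] (by omega)]
  simp
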